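-- pv_equiv track=rewrite | github.com/williamzhangNU/VAGEN | vagen/trainer/ppo/utils.py | group_turns_by_trajectory
-- ===== SOURCE A (Python) =====
-- def group_turns_by_trajectory(unique_turns: dict):
--     """
--     Group turns by trajectory (env_id) and sort by turn_id.
--
--     Returns:
--         trajectories: dict mapping env_id to sorted list of (turn_id, batch_idx) tuples
--     """
--     trajectories = {}
--     for (env_id, turn_id), batch_idx in unique_turns.items():
--         if env_id not in trajectories:
--             trajectories[env_id] = []
--         trajectories[env_id].append((turn_id, batch_idx))
--
--     # Sort turns within each trajectory by turn_id
--     for env_id in trajectories: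
--         trajectories[env_id].sort(key=lambda x: x[0])
--
--     return trajectories
-- ===== SOURCE B (Python) =====
-- def group_turns_by_trajectory(unique_turns: dict):
--     """Group turns by trajectory via one global stable sort instead of per-group sorts."""
--     trajectories = {env_id: [] for (env_id, _turn_id) in unique_turns}
--     for (env_id, turn_id), batch_idx in sorted(unique_turns.items(), key=lambda kv: kv[0][1]):
--         trajectories[env_id].append((turn_id, batch_idx))
--     return trajectories
-- ===== Notes on version B (the rewrite author's own statement) =====
-- stated objective: simpler
-- what changed: A appends into per-env lists and then sorts each group separately; B pre-creates the groups (dict comprehension over env ids, preserving first-occurrence key order) and fills them in one pass over the whole collection sorted once by turn_id, relying on sort stability, so the per-group sorts disappear.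
import Mathlib
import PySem

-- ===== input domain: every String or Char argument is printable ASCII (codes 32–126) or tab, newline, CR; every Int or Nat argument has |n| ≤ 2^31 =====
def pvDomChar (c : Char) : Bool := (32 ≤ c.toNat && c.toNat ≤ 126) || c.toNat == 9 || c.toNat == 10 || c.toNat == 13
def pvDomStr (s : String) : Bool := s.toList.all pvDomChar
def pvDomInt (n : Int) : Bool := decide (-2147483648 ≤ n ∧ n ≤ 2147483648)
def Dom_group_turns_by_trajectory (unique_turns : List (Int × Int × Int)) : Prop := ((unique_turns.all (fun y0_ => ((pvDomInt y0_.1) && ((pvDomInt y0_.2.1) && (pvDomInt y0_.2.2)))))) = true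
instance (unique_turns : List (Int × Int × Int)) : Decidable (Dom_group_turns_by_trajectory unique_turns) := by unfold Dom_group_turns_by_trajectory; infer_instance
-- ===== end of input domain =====

-- B replaces A's per-group sorts by one global stable sort followed by a single grouping pass
-- (objective: simpler). Return-value equivalence; neither version mutates its argument observably.

-- ===== PORT A =====
def group_turns_by_trajectory (unique_turns : List (Int × Int × Int)) : List (Int × List (Int × Int)) :=
  -- for (env_id, turn_id), batch_idx in unique_turns.items(): if absent insert []; append (turn_id, batch_idx)
  let trajectories : PySem.Dict Int (List (Int × Int)) :=
    unique_turns.foldl (fun d x =>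
      let d := if d.contains x.1 then d else d.insert x.1 []
      d.modify x.1 [] (fun v => v ++ [(x.2.1, x.2.2)])) PySem.Dict.empty
  -- for env_id in trajectories: trajectories[env_id].sort(key=lambda x: x[0])
  let trajectories :=
    trajectories.keys.foldl (fun d e =>
      d.modify e [] (fun v => PySem.List.sorted v (fun q => q.1) false)) trajectories
  trajectories.items

-- ===== PORT B =====
def group_turns_by_trajectory_alt (unique_turns : List (Int × Int × Int)) : List (Int × List (Int × Int)) :=
  -- trajectories = {env_id: [] for (env_id, _turn_id) in unique_turns}
  let trajectories : PySem.Dict Int (List (Int × Int)) :=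
    (unique_turns.map (fun x => x.1)).foldl (fun d e => d.insert e []) PySem.Dict.empty
  -- for (env_id, turn_id), batch_idx in sorted(unique_turns.items(), key=lambda kv: kv[0][1]): append
  -- (the key env_id is always present, so the list append is Dict.modify with default [])
  let srt := PySem.List.sorted unique_turns (fun x => x.2.1) false
  let trajectories :=
    srt.foldl (fun d x => d.modify x.1 [] (fun v => v ++ [(x.2.1, x.2.2)])) trajectories
  trajectories.items

-- ===== PRECONDITION & SPEC =====
-- Pre_ only demands that the association list is a valid representation of the Python dict
-- argument: the (env_id, turn_id) keys are pairwise distinct (a dict cannot carry duplicates).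
def Pre_group_turns_by_trajectory (unique_turns : List (Int × Int × Int)) : Prop :=
  (unique_turns.map (fun x => (x.1, x.2.1))).Nodup
instance (unique_turns : List (Int × Int × Int)) : Decidable (Pre_group_turns_by_trajectory unique_turns) := by unfold Pre_group_turns_by_trajectory; infer_instance

def pvWitness_group_turns_by_trajectory : (List (Int × Int × Int)) :=
  [(0, 1, 0), (1, 0, 1), (0, 0, 2), (1, 1, 3)]

def Spec_group_turns_by_trajectory (unique_turns : List (Int × Int × Int)) (out : List (Int × List (Int × Int))) : Prop := out = group_turns_by_trajectory_alt unique_turns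
instance (unique_turns : List (Int × Int × Int)) (out : List (Int × List (Int × Int))) : Decidable (Spec_group_turns_by_trajectory unique_turns out) := by unfold Spec_group_turns_by_trajectory; infer_instance

-- ===== CLAIM (what is proved, stated in full; the proofs are below) =====
def Claim_equal_group_turns_by_trajectory : Prop := ∀ (unique_turns : List (Int × Int × Int)), Dom_group_turns_by_trajectory unique_turns → Pre_group_turns_by_trajectory unique_turns → Spec_group_turns_by_trajectory unique_turns (group_turns_by_trajectory unique_turns)

-- ===== LEMMAS AND PROOFS =====

-- the value stored for one turn, and the (unsorted) group of env e in list order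
def pvProj (x : Int × Int × Int) : Int × Int := (x.2.1, x.2.2)
def pvGroup (l : List (Int × Int × Int)) (e : Int) : List (Int × Int) :=
  (l.filter (fun x => x.1 == e)).map pvProj

-- insertBy goes straight to the front when x precedes every element
lemma pv_insertBy_eq_cons {α : Type} (before : α → α → Bool) (x : α) (l : List α)
    (h : ∀ b ∈ l, before x b = true) : PySem.List.insertBy before x l = x :: l := by
  cases l with
  | nil => rfl
  | cons y ys => simp [PySem.List.insertBy, h y (by simp)]

-- A's "if env not seen, start []" followed by the append is just Dict.modify
lemma pv_stepA (d : PySem.Dict Int (List (Int × Int))) (e : Int) (f : List (Int × Int) → List (Int × Int)) :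
    (if d.contains e then d else d.insert e []).modify e [] f = d.modify e [] f := by
  by_cases h : d.contains e
  · simp [h]
  · simp only [h, Bool.false_eq_true, if_false]
    simp [PySem.Dict.modify, PySem.Dict.getD_insert_self, PySem.Dict.insert_insert_self,
      PySem.Dict.getD_of_not_contains d ([] : List (Int × Int)) (by simpa using h)]

-- filtering commutes with a stable insertion into a key-sorted list
lemma pv_filter_insertBy {α : Type} (p : α → Bool) (key : α → Int) (x : α) (ys : List α)
    (hs : ys.Pairwise (fun a b => key a ≤ key b)) :
    (PySem.List.insertBy (fun a b => decide (key a < key b)) x ys).filter p =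
      if p x then PySem.List.insertBy (fun a b => decide (key a < key b)) x (ys.filter p)
      else ys.filter p := by
  induction ys with
  | nil =>
    by_cases hp : p x <;> simp [PySem.List.insertBy, hp]
  | cons y ys ih =>
    rcases List.pairwise_cons.mp hs with ⟨hy, hp'⟩
    by_cases hlt : key x < key y
    · have hcons : PySem.List.insertBy (fun a b => decide (key a < key b)) x (y :: ys) = x :: y :: ys := by
        simp [PySem.List.insertBy, hlt]
      rw [hcons]
      by_cases hpy : p y
      · have hfy : (y :: ys).filter p = y :: ys.filter p := by simp [hpy]
        rw [hfy]
        by_cases hpx : p x <;> simp [PySem.List.insertBy, hlt, hpx, hpy]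
      · have hfy : (y :: ys).filter p = ys.filter p := by simp [hpy]
        rw [hfy]
        have hall : ∀ b ∈ ys.filter p, decide (key x < key b) = true := by
          intro b hb
          have hmem := List.mem_of_mem_filter hb
          simp [lt_of_lt_of_le hlt (hy b hmem)]
        rw [pv_insertBy_eq_cons _ _ _ hall]
        by_cases hpx : p x <;> simp [hpx, hpy]
    · have hcons : PySem.List.insertBy (fun a b => decide (key a < key b)) x (y :: ys) =
          y :: PySem.List.insertBy (fun a b => decide (key a < key b)) x ys := by
        simp [PySem.List.insertBy, hlt]
      rw [hcons]
      by_cases hpy : p y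
      · have hfy : (y :: ys).filter p = y :: ys.filter p := by simp [hpy]
        rw [hfy]
        have hcons2 : PySem.List.insertBy (fun a b => decide (key a < key b)) x (y :: ys.filter p) =
            y :: PySem.List.insertBy (fun a b => decide (key a < key b)) x (ys.filter p) := by
          simp [PySem.List.insertBy, hlt]
        rw [hcons2]
        by_cases hpx : p x <;> simp [hpx, hpy, ih hp']
      · have hfy : (y :: ys).filter p = ys.filter p := by simp [hpy]
        rw [hfy]
        simp [hpy, ih hp']

-- mapping commutes with stable insertion when the key factors through the map
lemma pv_map_insertBy {α β : Type} (f : α → β) (k : β → Int) (x : α) (m : List α) :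
    PySem.List.insertBy (fun a b => decide (k a < k b)) (f x) (m.map f) =
      (PySem.List.insertBy (fun a b => decide (k (f a) < k (f b))) x m).map f := by
  induction m with
  | nil => rfl
  | cons y ys ih =>
    by_cases h : k (f x) < k (f y) <;> simp [PySem.List.insertBy, h, ih]

-- sorting xs ++ [x] is a stable insertion of x into sorted xs
lemma pv_sorted_append {α : Type} (key : α → Int) (xs : List α) (x : α) :
    PySem.List.sorted (xs ++ [x]) key false =
      PySem.List.insertBy (fun a b => decide (key a < key b)) x (PySem.List.sorted xs key false) := by
  rw [PySem.List.sorted_eq_foldl_insertBy, PySem.List.sorted_eq_foldl_insertBy,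
    List.foldl_append, List.foldl_cons, List.foldl_nil]

-- stability: sorting then filtering is filtering then sorting
lemma pv_filter_sorted {α : Type} (p : α → Bool) (key : α → Int) (l : List α) :
    (PySem.List.sorted l key false).filter p = PySem.List.sorted (l.filter p) key false := by
  induction l using List.reverseRecOn with
  | nil => rfl
  | append_singleton xs x ih =>
    rw [pv_sorted_append, pv_filter_insertBy p key x _ (PySem.List.sorted_pairwise xs key)]
    by_cases hp : p x
    · have hfx : (xs ++ [x]).filter p = xs.filter p ++ [x] := by simp [hp]
      rw [hfx, pv_sorted_append, ih]
      simp [hp]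
    · have hfx : (xs ++ [x]).filter p = xs.filter p := by simp [hp]
      rw [hfx, ← ih]
      simp [hp]

-- sorting a mapped list is mapping the list sorted under the composed key
lemma pv_map_sorted {α β : Type} (f : α → β) (k : β → Int) (m : List α) :
    PySem.List.sorted (m.map f) k false =
      (PySem.List.sorted m (fun x => k (f x)) false).map f := by
  induction m using List.reverseRecOn with
  | nil => rfl
  | append_singleton xs x ih =>
    rw [List.map_append, List.map_singleton, pv_sorted_append, ih, pv_map_insertBy f k x,
      pv_sorted_append]

-- updating a set with elements it already has changes nothing
lemma pv_set_update_self {α : Type} [BEq α] [LawfulBEq α] (s : PySem.Set α) (l : List α)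
    (h : ∀ x ∈ l, x ∈ s) : PySem.Set.update s l = s := by
  induction l generalizing s with
  | nil => rfl
  | cons y ys ih =>
    have hy : PySem.Set.add s y = s := by
      simp [PySem.Set.add, PySem.Set.contains, h y (by simp)]
    show PySem.Set.update (PySem.Set.add s y) ys = s
    rw [hy]
    exact ih s (fun x hx => h x (by simp [hx]))

-- a fold of modify over distinct keys rewrites exactly the listed entries
lemma pv_getD_foldl_modify (g : List (Int × Int) → List (Int × Int)) (ks : List Int)
    (d : PySem.Dict Int (List (Int × Int))) (hk : ks.Nodup) (c : Int) :
    (ks.foldl (fun d e => d.modify e [] g) d).getD c [] =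
      if c ∈ ks then g (d.getD c []) else d.getD c [] := by
  induction ks generalizing d with
  | nil => simp
  | cons k ks ih =>
    rcases List.nodup_cons.mp hk with ⟨hnk, hnd⟩
    rw [List.foldl_cons, ih _ hnd]
    by_cases hc : c = k
    · subst hc
      simp [hnk]
    · simp [hc, PySem.Dict.getD_modify]

-- inserting [] for every key leaves every default-[] lookup at []
lemma pv_getD_foldl_insert_nil (ks : List Int) (d : PySem.Dict Int (List (Int × Int)))
    (h : ∀ c, d.getD c [] = []) (c : Int) :
    (ks.foldl (fun d e => d.insert e ([] : List (Int × Int))) d).getD c [] = [] := by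
  induction ks generalizing d with
  | nil => exact h c
  | cons k ks ih =>
    rw [List.foldl_cons]
    refine ih _ (fun c' => ?_)
    rw [PySem.Dict.getD_insert]
    by_cases hc : c' = k <;> simp [hc, h]

-- the first loop of A (after pv_stepA) is a modify-append fold; name its lookups
lemma pv_getD_fill (l : List (Int × Int × Int)) (d : PySem.Dict Int (List (Int × Int))) (c : Int) :
    (l.foldl (fun d x => d.modify x.1 [] (fun v => v ++ [(x.2.1, x.2.2)])) d).getD c [] =
      d.getD c [] ++ pvGroup l c := by
  have hm : l.foldl (fun d x => d.modify x.1 [] (fun v => v ++ [(x.2.1, x.2.2)])) d =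
      (l.map (fun x => (x.1, (x.2.1, x.2.2)))).foldl
        (fun d p => d.modify p.1 [] (fun v => v ++ [p.2])) d := by
    rw [List.foldl_map]
  rw [hm, PySem.Dict.getD_foldl_modify_append]
  congr 1
  simp [pvGroup, pvProj]

-- keys of A's/B's grouping dicts: first-occurrence env order
lemma pv_keys_fill (l : List (Int × Int × Int)) (d : PySem.Dict Int (List (Int × Int))) :
    (l.foldl (fun d x => d.modify x.1 [] (fun v => v ++ [(x.2.1, x.2.2)])) d).keys =
      PySem.Set.update d.keys (l.map (fun x => x.1)) := by
  exact PySem.Dict.keys_foldl_modify_key l (fun x => x.1) [] (fun _ x v => v ++ [(x.2.1, x.2.2)]) d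

-- A's result, in canonical form
lemma pv_A_char (l : List (Int × Int × Int)) :
    group_turns_by_trajectory l =
      (PySem.Set.ofList (l.map (fun x => x.1))).map
        (fun e => (e, PySem.List.sorted (pvGroup l e) (fun q => q.1) false)) := by
  unfold group_turns_by_trajectory
  simp only [pv_stepA]
  set E := PySem.Set.ofList (l.map (fun x => x.1)) with hE
  set d1 := l.foldl (fun d x => d.modify x.1 [] (fun v => v ++ [(x.2.1, x.2.2)])) PySem.Dict.empty with hd1
  have hkeys1 : d1.keys = E := by
    rw [hd1, pv_keys_fill]; simp [PySem.Dict.keys_empty, hE, PySem.Set.update, PySem.Set.ofList_eq_foldl]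
  have hnd1 : d1.keys.Nodup := by
    rw [hkeys1, hE]; exact PySem.Set.nodup_ofList _
  have hndE : E.Nodup := by rw [← hkeys1]; exact hnd1
  have hget1 : ∀ c, d1.getD c [] = pvGroup l c := by
    intro c; rw [hd1, pv_getD_fill]; simp
  set d2 := d1.keys.foldl (fun d e => d.modify e [] (fun v => PySem.List.sorted v (fun q => q.1) false)) d1 with hd2
  have hkeys2 : d2.keys = E := by
    rw [hd2, PySem.Dict.keys_foldl_modify_key d1.keys (fun e => e) []
      (fun _ _ v => PySem.List.sorted v (fun q => q.1) false) d1]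
    rw [List.map_id', hkeys1, pv_set_update_self _ _ (fun x hx => hx)]
  have hnd2 : d2.keys.Nodup := by rw [hkeys2]; exact hndE
  have hget2 : ∀ c, c ∈ E → d2.getD c [] = PySem.List.sorted (pvGroup l c) (fun q => q.1) false := by
    intro c hc
    rw [hd2, pv_getD_foldl_modify _ _ _ hnd1 c, hkeys1]
    simp [hc, hget1]
  rw [PySem.Dict.items_eq_map_keys d2 hnd2 [], hkeys2]
  exact List.map_congr_left (fun e he => by rw [hget2 e he])

-- B's result, in canonical form
lemma pv_B_char (l : List (Int × Int × Int)) :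
    group_turns_by_trajectory_alt l =
      (PySem.Set.ofList (l.map (fun x => x.1))).map
        (fun e => (e, ((PySem.List.sorted l (fun x => x.2.1) false).filter
            (fun x => x.1 == e)).map pvProj)) := by
  unfold group_turns_by_trajectory_alt
  set E := PySem.Set.ofList (l.map (fun x => x.1)) with hE
  set d0 := (l.map (fun x => x.1)).foldl (fun d e => d.insert e []) PySem.Dict.empty with hd0
  have hkeys0 : d0.keys = E := by
    rw [hd0, PySem.Dict.keys_foldl_insert (l.map (fun x => x.1)) (fun _ _ => []) PySem.Dict.empty]
    simp [PySem.Dict.keys_empty, hE, PySem.Set.update, PySem.Set.ofList_eq_foldl]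
  have hnd0 : d0.keys.Nodup := by
    rw [hkeys0, hE]; exact PySem.Set.nodup_ofList _
  have hget0 : ∀ c, d0.getD c [] = [] := by
    intro c; rw [hd0]; exact pv_getD_foldl_insert_nil _ _ (by simp) c
  set s := PySem.List.sorted l (fun x => x.2.1) false with hs
  set d2 := s.foldl (fun d x => d.modify x.1 [] (fun v => v ++ [(x.2.1, x.2.2)])) d0 with hd2
  have hkeys2 : d2.keys = E := by
    rw [hd2, pv_keys_fill, hkeys0]
    refine pv_set_update_self _ _ (fun x hx => ?_)
    rcases List.mem_map.mp hx with ⟨y, hy, rfl⟩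
    have hyl : y ∈ l := (PySem.List.mem_sorted l (fun x => x.2.1) false y).mp (hs ▸ hy)
    rw [hE]
    exact (PySem.Set.mem_ofList _ _).mpr (List.mem_map_of_mem hyl)
  have hnd2 : d2.keys.Nodup := by
    rw [hkeys2, hE]; exact PySem.Set.nodup_ofList _
  have hget2 : ∀ c, d2.getD c [] = (s.filter (fun x => x.1 == c)).map pvProj := by
    intro c; rw [hd2, pv_getD_fill, hget0]; simp [pvGroup]
  rw [PySem.Dict.items_eq_map_keys d2 hnd2 [], hkeys2]
  exact List.map_congr_left (fun e _ => by rw [hget2 e])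

-- the crux: one global stable sort then filter = filter then sort, transported through pvProj
lemma pv_crux (l : List (Int × Int × Int)) (e : Int) :
    ((PySem.List.sorted l (fun x => x.2.1) false).filter (fun x => x.1 == e)).map pvProj =
      PySem.List.sorted (pvGroup l e) (fun q => q.1) false := by
  rw [pv_filter_sorted (fun x => x.1 == e) (fun x => x.2.1) l]
  rw [pvGroup, pv_map_sorted pvProj (fun q => q.1)]
  rfl

-- ===== VERDICT (by name: the statement is the Claim_ definition above) =====
theorem group_turns_by_trajectory_spec : Claim_equal_group_turns_by_trajectory := by
  intro l _hdom _hpre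
  unfold Spec_group_turns_by_trajectory
  rw [pv_A_char, pv_B_char]
  exact List.map_congr_left (fun e _ => by rw [pv_crux])
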